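-- pv_equiv track=rewrite | github.com/danila-panteleev/yandex-direct-to-google-ads | source/source.py | convert_headline_template
-- ===== SOURCE A (Python) =====
-- def convert_headline_template(headline):
--     if type(headline) != str or headline == '':
--         return ''
--
--     headline = list(headline)
--
--     if headline.count('#') == 2:
--         counter = 0
--         for i in range(len(headline)):
--             if headline[i] == '#':
--                 if counter == 0:
--                     headline[i] = '{Keyword:'
--                     counter += 1
--                 elif counter == 1:
--                     headline[i] = '}'
--                     break
--
--     return ''.join(headline)
-- ===== SOURCE B (Python) =====
-- def convert_headline_template(headline):
--     if type(headline) != str or headline == '':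
--         return ''
--     if headline.count('#') == 2:
--         first, second, third = headline.split('#')
--         return first + '{Keyword:' + second + '}' + third
--     return headline
-- ===== Notes on version B (the rewrite author's own statement) =====
-- stated objective: simpler
-- what changed: Replaces the list-of-chars copy with an index loop and counter-driven in-place mutation by splitting on the hash separator into three segments rejoined around the template markers.
import Mathlib
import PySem

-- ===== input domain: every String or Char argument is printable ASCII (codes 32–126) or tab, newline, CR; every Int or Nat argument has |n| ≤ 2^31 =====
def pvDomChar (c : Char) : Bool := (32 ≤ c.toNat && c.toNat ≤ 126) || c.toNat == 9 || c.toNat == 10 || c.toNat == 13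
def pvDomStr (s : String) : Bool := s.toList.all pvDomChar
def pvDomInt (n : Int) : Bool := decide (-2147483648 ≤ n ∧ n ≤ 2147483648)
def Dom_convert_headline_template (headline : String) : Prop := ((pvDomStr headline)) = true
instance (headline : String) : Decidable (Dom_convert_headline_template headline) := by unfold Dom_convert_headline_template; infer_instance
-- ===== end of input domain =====

-- B replaces A's list-of-chars copy + index/counter mutation loop by a split on '#' into
-- three segments rejoined around the template markers (objective: simpler).


-- ===== PORT A =====
-- the for-loop: the mutable list of entries (chars as singleton strings, replaced entries
-- as longer strings) is traversed once; counter as in A; 'break' = returning the untouched tail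
def pvALoop : List String → Nat → List String
  | [], _ => []
  | s :: rest, counter =>
    if s = "#" then
      if counter = 0 then "{Keyword:" :: pvALoop rest 1
      else if counter = 1 then "}" :: rest            -- break: rest untouched
      else s :: pvALoop rest counter
    else s :: pvALoop rest counter

def convert_headline_template (headline : String) : String :=
  if headline = "" then ""
  else
    let hl := headline.toList.map (fun c => String.singleton c)   -- headline = list(headline)
    let hl := if hl.count "#" = 2 then pvALoop hl 0 else hl
    PySem.Str.join "" hl                                          -- ''.join(headline)

-- ===== PORT B =====
def convert_headline_template_alt (headline : String) : String :=
  if headline = "" then ""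
  else if PySem.Str.count headline "#" = 2 then
    match PySem.Str.split? headline "#" with
    | some [first, second, third] => first ++ "{Keyword:" ++ second ++ "}" ++ third
    | _ => headline      -- unreachable (count = 2 ⇒ exactly 3 parts); totality guard for the tuple unpacking
  else headline

-- ===== PRECONDITION & SPEC =====
def Spec_convert_headline_template (headline : String) (out : String) : Prop := out = convert_headline_template_alt headline
instance (headline : String) (out : String) : Decidable (Spec_convert_headline_template headline out) := by unfold Spec_convert_headline_template; infer_instance

-- ===== CLAIM (what is proved, stated in full; the proofs are below) =====
def Claim_equal_convert_headline_template : Prop := ∀ (headline : String), Dom_convert_headline_template headline → Spec_convert_headline_template headline (convert_headline_template headline)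

-- ===== LEMMAS AND PROOFS =====

-- PySem.Chars.count with a single-character needle is List.count
theorem pv_count_go_single (c : Char) (cs : List Char) : ∀ (fuel acc : Nat),
    cs.length ≤ fuel → PySem.Chars.count.go [c] fuel cs acc = acc + cs.count c := by
  induction cs with
  | nil => intro fuel acc _; cases fuel <;> simp [PySem.Chars.count.go]
  | cons a t ih =>
    intro fuel acc hle
    cases fuel with
    | zero => simp at hle
    | succ f =>
      simp only [PySem.Chars.count.go]
      by_cases h : a = c
      · subst h
        simp [List.isPrefixOf, ih f (acc + 1) (by simpa using hle), List.count_cons]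
        omega
      · have : [c].isPrefixOf (a :: t) = false := by
          simp [List.isPrefixOf]; exact fun hh => (h hh.symm).elim
        simp [this, ih f acc (by simpa using hle), List.count_cons, h]

theorem pv_count_single (c : Char) (cs : List Char) :
    PySem.Chars.count cs [c] = cs.count c := by
  cases cs with
  | nil => rfl
  | cons a t =>
    simp only [PySem.Chars.count]
    rw [pv_count_go_single c (a :: t) (a :: t).length 0 (le_refl _)]
    simp

-- counting "#" among the singleton strings is counting '#' among the chars
theorem pv_count_map_singleton (cs : List Char) :
    (cs.map (fun c => String.singleton c)).count "#" = cs.count '#' := by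
  induction cs with
  | nil => rfl
  | cons a t ih =>
    simp only [List.map_cons, List.count_cons, ih]
    congr 1
    by_cases h : a = '#'
    · subst h; simp [String.singleton]
    · have h1 : (String.singleton a == "#") = false := by
        apply beq_false_of_ne; intro hs
        exact h (by simpa using congrArg String.toList hs)
      have h2 : (a == '#') = false := beq_false_of_ne h
      simp [h1, h2]

-- a count of n+1 splits off a needle-free prefix before the first needle
theorem pv_split_first (c : Char) (cs : List Char) (n : Nat) (h : cs.count c = n + 1) :
    ∃ u rest, cs = u ++ c :: rest ∧ u.count c = 0 ∧ rest.count c = n := by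
  induction cs with
  | nil => simp at h
  | cons a t ih =>
    by_cases hac : a = c
    · subst hac
      refine ⟨[], t, by simp, by simp, ?_⟩
      simpa [List.count_cons] using h
    · have ht : t.count c = n + 1 := by simpa [List.count_cons, hac] using h
      obtain ⟨u, rest, he, hu, hr⟩ := ih ht
      exact ⟨a :: u, rest, by simp [he], by simp [List.count_cons, hac, hu], hr⟩

-- the A-loop walks over needle-free singleton prefixes unchanged
theorem pv_aLoop_free (u : List Char) (hu : u.count c = 0) (hc : c = '#') :
    ∀ (rest : List String) (k : Nat),
    pvALoop (u.map (fun x => String.singleton x) ++ rest) k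
      = u.map (fun x => String.singleton x) ++ pvALoop rest k := by
  subst hc
  induction u with
  | nil => intro rest k; simp
  | cons a t ih =>
    intro rest k
    have ha : a ≠ '#' := by intro h; simp [h, List.count_cons] at hu
    have ht : t.count '#' = 0 := by simp [List.count_cons] at hu; omega
    have hs : String.singleton a ≠ "#" := by
      intro hs; exact ha (by simpa using congrArg String.toList hs)
    simp only [List.map_cons, List.cons_append, pvALoop, if_neg hs]
    rw [ih ht rest k]

-- splitOn.go: consuming a needle-free prefix up to the first needle
theorem pv_splitOn_go_free (c : Char) (u : List Char) (hu : u.count c = 0) :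
    ∀ (tailPart : List Char) (fuel : Nat) (cur : List Char) (acc : List (List Char)),
    u.length + tailPart.length < fuel →
    PySem.Chars.splitOn.go [c] fuel (u ++ c :: tailPart) cur acc
      = PySem.Chars.splitOn.go [c] (fuel - (u.length + 1)) tailPart [] ((cur.reverse ++ u) :: acc) := by
  induction u with
  | nil =>
    intro t fuel cur acc hf
    cases fuel with
    | zero => omega
    | succ f =>
      simp only [PySem.Chars.splitOn.go, List.nil_append]
      have hp : [c].isPrefixOf (c :: t) = true := by simp [List.isPrefixOf]
      simp [hp]
  | cons a u' ih =>
    intro t fuel cur acc hf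
    have ha : a ≠ c := by intro h; simp [h, List.count_cons] at hu
    have hu' : u'.count c = 0 := by simp [List.count_cons] at hu; omega
    cases fuel with
    | zero => simp at hf
    | succ f =>
      simp only [List.cons_append, PySem.Chars.splitOn.go]
      have hp : [c].isPrefixOf (a :: (u' ++ c :: t)) = false := by
        simp [List.isPrefixOf]; exact fun hh => (ha hh.symm).elim
      simp only [hp, Bool.false_eq_true, if_false]
      rw [ih hu' t f (a :: cur) acc (by simp at hf ⊢; omega)]
      have hfe : f - (u'.length + 1) = f + 1 - ((a :: u').length + 1) := by simp
      rw [hfe]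
      simp

-- splitOn.go on a needle-free remainder
theorem pv_splitOn_go_last (c : Char) (w : List Char) (hw : w.count c = 0) :
    ∀ (fuel : Nat) (cur : List Char) (acc : List (List Char)),
    w.length < fuel →
    PySem.Chars.splitOn.go [c] fuel w cur acc = acc.reverse ++ [cur.reverse ++ w] := by
  induction w with
  | nil =>
    intro fuel cur acc hf
    cases fuel with
    | zero => omega
    | succ f => simp [PySem.Chars.splitOn.go]
  | cons a t ih =>
    intro fuel cur acc hf
    have ha : a ≠ c := by intro h; simp [h, List.count_cons] at hw
    have ht : t.count c = 0 := by simp [List.count_cons] at hw; omega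
    cases fuel with
    | zero => simp at hf
    | succ f =>
      simp only [PySem.Chars.splitOn.go]
      have hp : [c].isPrefixOf (a :: t) = false := by
        simp [List.isPrefixOf]; exact fun hh => (ha hh.symm).elim
      simp only [hp, Bool.false_eq_true, if_false]
      rw [ih ht f (a :: cur) acc (by simp at hf ⊢; omega)]
      simp

-- splitOn with exactly two needles gives exactly the three segments
theorem pv_splitOn_two (u v w : List Char)
    (hu : u.count '#' = 0) (hv : v.count '#' = 0) (hw : w.count '#' = 0) :
    PySem.Chars.splitOn (u ++ '#' :: (v ++ '#' :: w)) ['#'] = [u, v, w] := by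
  simp only [PySem.Chars.splitOn]
  rw [pv_splitOn_go_free '#' u hu (v ++ '#' :: w) _ [] [] (by simp)]
  simp only [List.reverse_nil, List.nil_append]
  rw [pv_splitOn_go_free '#' v hv w _ [] [u] (by simp)]
  simp only [List.reverse_nil, List.nil_append]
  rw [pv_splitOn_go_last '#' w hw _ [] [v, u] (by simp)]
  simp

-- ''.join of singleton strings restores the string
theorem pv_join_toList (parts : List String) :
    (PySem.Str.join "" parts).toList = (parts.map String.toList).flatten := by
  simp [PySem.Str.join, PySem.Chars.join, List.intercalate]
  induction parts with
  | nil => rfl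
  | cons p ps ih =>
    cases ps with
    | nil => simp
    | cons q qs => simpa [List.intersperse, List.flatten] using ih

theorem pv_flatten_singletons (cs : List Char) :
    ((cs.map (fun c => String.singleton c)).map String.toList).flatten = cs := by
  induction cs with
  | nil => rfl
  | cons a t ih => simpa using ih

-- ===== VERDICT (by name: the statement is the Claim_ definition above) =====
theorem convert_headline_template_spec : Claim_equal_convert_headline_template := by
  intro h _
  unfold Spec_convert_headline_template convert_headline_template convert_headline_template_alt
  by_cases h0 : h = ""
  · simp [h0]
  · simp only [h0, if_false]
    have hhash : "#".toList = ['#'] := rfl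
    have hcA : (h.toList.map (fun c => String.singleton c)).count "#" = h.toList.count '#' :=
      pv_count_map_singleton h.toList
    have hcB : PySem.Str.count h "#" = h.toList.count '#' := by
      simp only [PySem.Str.count, hhash]; exact pv_count_single '#' h.toList
    rw [hcA, hcB]
    by_cases h2 : h.toList.count '#' = 2
    · -- both branches fire; decompose h.toList around the two '#'
      obtain ⟨u, rest, he1, hu, hr⟩ := pv_split_first '#' h.toList 1 h2
      obtain ⟨v, w, he2, hv, hw⟩ := pv_split_first '#' rest 0 hr
      have he : h.toList = u ++ '#' :: (v ++ '#' :: w) := by rw [he1, he2]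
      rw [if_pos h2, if_pos h2]
      have hsplit : PySem.Str.split? h "#" =
          some [String.ofList u, String.ofList v, String.ofList w] := by
        simp only [PySem.Str.split?, PySem.Chars.split?, hhash]
        rw [he, pv_splitOn_two u v w hu hv hw]
        rfl
      rw [hsplit]
      have hAl : pvALoop (h.toList.map (fun c => String.singleton c)) 0
          = u.map (fun c => String.singleton c) ++ "{Keyword:"
            :: (v.map (fun c => String.singleton c) ++ "}" :: w.map (fun c => String.singleton c)) := by
        rw [he]
        simp only [List.map_append, List.map_cons]
        rw [pv_aLoop_free u hu rfl]
        show _ ++ pvALoop ("#" :: _) 0 = _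
        simp only [pvALoop, if_pos rfl]
        rw [pv_aLoop_free v hv rfl]
        show _ = _ ++ "{Keyword:" :: (_ ++ pvALoop ("#" :: _) 1)
        have hsh : String.singleton '#' = "#" := rfl
        simp [pvALoop, hsh]
      apply String.toList_injective
      rw [pv_join_toList, hAl]
      simp only [List.map_append, List.map_cons, List.flatten_append, List.flatten_cons,
        pv_flatten_singletons, String.toList_append, String.toList_ofList]
      simp
    · rw [if_neg h2, if_neg h2]
      apply String.toList_injective
      rw [pv_join_toList, pv_flatten_singletons]
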